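-- pv_equiv track=rewrite | github.com/mr-Dees/Act-Constructor | app/formatters/ai_readable_formatter.py | _build_simple_markdown
-- ===== SOURCE A (Python) =====
-- def _build_simple_markdown(grid: list[list[dict]]) -> list[str]:
--     """
--     Строит Markdown таблицу для таблиц БЕЗ объединенных ячеек.
--     """
--     if not grid:
--         return []
--
--     rows: list[str] = []
--
--     for row_idx, row in enumerate(grid):
--         cells = [cell.get("content", "").strip() for cell in row]
--
--         if not cells:
--             continue
--
--         row_str = "| " + " | ".join(cells) + " |"
--         rows.append(row_str)
--
--         if row_idx == 0:
--             separator = "| " + " | ".join(["---"] * len(cells)) + " |"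
--             rows.append(separator)
--
--     return rows
-- ===== SOURCE B (Python) =====
-- def _build_simple_markdown(grid: list[list[dict]]) -> list[str]:
--     # Recursive decomposition: the head row decides the header (row + separator,
--     # where the separator is produced by formatting a synthetic row of "---" cells);
--     # the tail is rendered by a recursive helper that drops empty rows.
--     def fmt(row):
--         return "| " + " | ".join(c.get("content", "").strip() for c in row) + " |"
--
--     def body(rows):
--         if not rows:
--             return []
--         head, tail = rows[0], rows[1:]
--         return ([fmt(head)] if head else []) + body(tail)
--
--     if not grid:
--         return []
--     first, tail = grid[0], grid[1:]
--     if not first: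
--         return body(tail)
--     return [fmt(first), fmt([{"content": "---"}] * len(first))] + body(tail)
-- ===== Notes on version B (the rewrite author's own statement) =====
-- stated objective: alternative
-- what changed: Replaces the single enumerate loop with an index==0 branch by a recursive decomposition: the head row is handled once up front (its separator produced by formatting a synthetic row of '---' cells through the same row formatter), and the tail is rendered by a recursive helper that skips empty rows.
import Mathlib
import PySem

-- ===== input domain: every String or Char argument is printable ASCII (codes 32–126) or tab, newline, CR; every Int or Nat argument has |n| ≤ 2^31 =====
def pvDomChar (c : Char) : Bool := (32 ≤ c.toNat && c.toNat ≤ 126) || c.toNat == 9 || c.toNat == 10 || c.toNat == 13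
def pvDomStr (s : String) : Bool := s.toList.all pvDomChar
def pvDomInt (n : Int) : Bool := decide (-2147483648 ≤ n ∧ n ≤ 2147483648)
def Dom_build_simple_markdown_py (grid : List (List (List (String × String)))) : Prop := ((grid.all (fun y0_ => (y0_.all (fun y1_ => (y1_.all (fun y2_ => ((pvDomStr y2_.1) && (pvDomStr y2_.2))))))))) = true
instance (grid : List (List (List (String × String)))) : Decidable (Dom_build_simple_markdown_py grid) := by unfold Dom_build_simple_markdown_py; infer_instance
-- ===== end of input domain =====

-- B trades A's enumerate loop (with an inline index==0 branch) for a head/tail recursive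
-- decomposition whose separator is produced by formatting a synthetic '---' row (objective: alternative).


-- ===== PORT A =====
-- loop body of A's for-loop, named so the port is 'foldl pvStepA' over enumerate(grid)
def pvStepA (rows : List String) (p : Int × List (List (String × String))) : List String :=
  let cells := p.2.map (fun cell => PySem.Str.strip ((PySem.Dict.mk cell).getD "content" ""))
  if cells = [] then rows
  else
    let rows := rows ++ ["| " ++ PySem.Str.join " | " cells ++ " |"]
    if p.1 = 0 then
      rows ++ ["| " ++ PySem.Str.join " | " (List.replicate cells.length "---") ++ " |"]
    else rows

def build_simple_markdown_py (grid : List (List (List (String × String)))) : List String :=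
  if grid = [] then []
  else (PySem.List.enumerate grid).foldl pvStepA []

-- ===== PORT B =====
-- fmt: one markdown row from a list of cells
def pvFmtB (row : List (List (String × String))) : String :=
  "| " ++ PySem.Str.join " | "
    (row.map (fun c => PySem.Str.strip ((PySem.Dict.mk c).getD "content" ""))) ++ " |"

-- body: recursive rendering of the remaining rows, skipping empty ones
def pvBodyB : List (List (List (String × String))) → List String
  | [] => []
  | head :: tail => (if head = [] then [] else [pvFmtB head]) ++ pvBodyB tail

def build_simple_markdown_py_alt (grid : List (List (List (String × String)))) : List String :=
  match grid with
  | [] => []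
  | first :: tail =>
    if first = [] then pvBodyB tail
    else [pvFmtB first, pvFmtB (List.replicate first.length [("content", "---")])] ++ pvBodyB tail

-- ===== PRECONDITION & SPEC =====
def Spec_build_simple_markdown_py (grid : List (List (List (String × String)))) (out : List String) : Prop := out = build_simple_markdown_py_alt grid
instance (grid : List (List (List (String × String)))) (out : List String) : Decidable (Spec_build_simple_markdown_py grid out) := by unfold Spec_build_simple_markdown_py; infer_instance

-- ===== CLAIM (what is proved, stated in full; the proofs are below) =====
def Claim_equal_build_simple_markdown_py : Prop := ∀ (grid : List (List (List (String × String)))), Dom_build_simple_markdown_py grid → Spec_build_simple_markdown_py grid (build_simple_markdown_py grid)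

-- ===== LEMMAS AND PROOFS =====

def pvCellStr (c : List (String × String)) : String :=
  PySem.Str.strip ((PySem.Dict.mk c).getD "content" "")

theorem map_pvCellStr (r : List (List (String × String))) :
    r.map pvCellStr = r.map (fun c => PySem.Str.strip ((PySem.Dict.mk c).getD "content" "")) := rfl

theorem pvStepA_empty (rows : List String) (s : Int) :
    pvStepA rows (s, []) = rows := by
  simp [pvStepA]

theorem pvStepA_pos (rows : List String) (s : Int) (r : List (List (String × String)))
    (hr : r ≠ []) (hs : s ≠ 0) :
    pvStepA rows (s, r) = rows ++ [pvFmtB r] := by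
  simp [pvStepA, map_pvCellStr, pvFmtB, hr, hs]

theorem pvStepA_zero (rows : List String) (r : List (List (String × String))) (hr : r ≠ []) :
    pvStepA rows (0, r) = rows ++ [pvFmtB r]
      ++ ["| " ++ PySem.Str.join " | " (List.replicate r.length "---") ++ " |"] := by
  simp [pvStepA, map_pvCellStr, pvFmtB, hr]

-- B's synthetic '---' row formats to A's separator string
theorem pvSepB (n : Nat) :
    pvFmtB (List.replicate n [("content", "---")])
      = "| " ++ PySem.Str.join " | " (List.replicate n "---") ++ " |" := by
  have h : PySem.Str.strip ((PySem.Dict.mk [("content", "---")]).getD "content" "") = "---" := by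
    decide
  simp [pvFmtB, List.map_replicate, h]

-- A's loop over rows of index ≥ 1 computes B's recursive body
theorem pv_tail_fold (t : List (List (List (String × String)))) :
    ∀ (acc : List String) (s : Int), 1 ≤ s →
    (PySem.List.enumerate t s).foldl pvStepA acc = acc ++ pvBodyB t := by
  induction t with
  | nil => intro acc s _; simp [PySem.List.enumerate_nil, pvBodyB]
  | cons r t ih =>
    intro acc s hs
    have hs0 : s ≠ 0 := by omega
    rw [PySem.List.enumerate_cons, List.foldl_cons]
    by_cases hr : r = []
    · subst hr
      rw [pvStepA_empty, ih acc (s + 1) (by omega)]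
      simp [pvBodyB]
    · rw [pvStepA_pos acc s r hr hs0, ih _ (s + 1) (by omega)]
      simp [pvBodyB, hr]

-- ===== VERDICT (by name: the statement is the Claim_ definition above) =====
theorem build_simple_markdown_py_spec : Claim_equal_build_simple_markdown_py := by
  intro grid _
  unfold Spec_build_simple_markdown_py build_simple_markdown_py build_simple_markdown_py_alt
  cases grid with
  | nil => simp
  | cons g0 t =>
    simp only [if_neg (List.cons_ne_nil g0 t)]
    rw [PySem.List.enumerate_cons, List.foldl_cons]
    by_cases hg : g0 = []
    · subst hg
      rw [pvStepA_empty, show (0:Int)+1 = 1 by norm_num, pv_tail_fold t [] 1 (by omega)]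
      simp
    · rw [pvStepA_zero [] g0 hg, show (0:Int)+1 = 1 by norm_num, pv_tail_fold t _ 1 (by omega),
        pvSepB]
      simp [hg]
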